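-- pv_equiv track=rewrite | github.com/geekyfaahad/Awaaz-news | app.py | _check_subject_action_alignment
-- ===== SOURCE A (Python) =====
-- _SERIOUS_CLAIM_BRIDGE_WORDS = frozenset({
--     "is", "was", "were", "has", "have", "had", "been", "being", "be",
--     "found", "confirmed", "reportedly", "reported", "declared",
--     "officially", "now", "feared",
-- })
--
-- def _find_subject_spans(claim_subjects: list, headline_tokens: list) -> list:
--     """
--     Find tight, ordered spans where the claim subject appears in the headline.
--
--     For person-name claims we prefer compact spans like "omar abdullah", not
--     loose token matches scattered across the headline.
--     """
--     if not claim_subjects or not headline_tokens: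
--         return []
--
--     unique_subjects = list(dict.fromkeys(claim_subjects))
--     required_matches = 1 if len(unique_subjects) == 1 else 2
--     spans = []
--
--     for start in range(len(headline_tokens)):
--         if headline_tokens[start] != unique_subjects[0]:
--             continue
--
--         matched = 1
--         last_pos = start
--         for token in unique_subjects[1:]:
--             found_pos = None
--             for pos in range(last_pos + 1, min(len(headline_tokens), last_pos + 3)):
--                 if headline_tokens[pos] == token:
--                     found_pos = pos
--                     break
--             if found_pos is None:
--                 break
--             matched += 1
--             last_pos = found_pos
--
--         if matched >= required_matches:
--             spans.append((start, last_pos))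
--
--     return spans
--
-- def _check_subject_action_alignment(
--     claim_subjects: list, claim_actions: set,
--     headline_tokens: list, headline_actions: set
-- ) -> bool:
--     """
--     Check if the subject of the action is the same in both claim and headline.
--
--     E.g., "omar abdullah killed" — subject is "omar abdullah", action is "killed".
--     If headline says "terrorists killed in encounter... Omar Abdullah questions",
--     the subject of "killed" in the headline is "terrorists", not "omar abdullah".
--     """
--     if not claim_subjects or not headline_tokens:
--         return False
--
--     subject_spans = _find_subject_spans(claim_subjects, headline_tokens)
--     action_positions = [i for i, t in enumerate(headline_tokens) if t in headline_actions]
--     if not action_positions or not subject_spans: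
--         return False
--
--     for act_pos in action_positions:
--         for span_start, span_end in subject_spans:
--             if span_end < act_pos:
--                 bridge = headline_tokens[span_end + 1:act_pos]
--                 if len(bridge) <= 2 and all(t in _SERIOUS_CLAIM_BRIDGE_WORDS for t in bridge):
--                     return True
--
--             if act_pos < span_start:
--                 if act_pos + 1 >= len(headline_tokens) or headline_tokens[act_pos + 1] != "of":
--                     continue
--                 bridge = headline_tokens[act_pos + 2:span_start]
--                 if len(bridge) <= 2 and all(t in _SERIOUS_CLAIM_BRIDGE_WORDS for t in bridge):
--                     return True
--
--     return False
-- ===== SOURCE B (Python) =====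
-- # Alternative implementation: instead of materialising all subject spans and all
-- # action positions and testing every (action, span) pair, scan the headline once;
-- # at each span found, test only the constant-size windows (<= 3 tokens after the
-- # span, <= 4 tokens before it) where the bridge-length bound allows an alignment.
--
-- _SERIOUS_CLAIM_BRIDGE_WORDS = frozenset({
--     "is", "was", "were", "has", "have", "had", "been", "being", "be",
--     "found", "confirmed", "reportedly", "reported", "declared",
--     "officially", "now", "feared",
-- })
--
--
-- def _check_subject_action_alignment(claim_subjects, claim_actions,
--                                     headline_tokens, headline_actions):
--     if not claim_subjects or not headline_tokens:
--         return False
--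
--     subjects = list(dict.fromkeys(claim_subjects))
--     need = 1 if len(subjects) == 1 else 2
--     n = len(headline_tokens)
--     first = subjects[0]
--
--     for start, tok in enumerate(headline_tokens):
--         if tok != first:
--             continue
--
--         matched, end = 1, start
--         for sub in subjects[1:]:
--             if end + 1 < n and headline_tokens[end + 1] == sub:
--                 end += 1
--             elif end + 2 < n and headline_tokens[end + 2] == sub:
--                 end += 2
--             else:
--                 break
--             matched += 1
--         if matched < need:
--             continue
--
--         # action shortly after the span, bridged only by serious bridge words
--         j = end + 1
--         while j < n and j <= end + 3:
--             if headline_tokens[j] in headline_actions: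
--                 return True
--             if headline_tokens[j] not in _SERIOUS_CLAIM_BRIDGE_WORDS:
--                 break
--             j += 1
--
--         # "<action> of <bridge words...> <subject>" shortly before the span
--         for j in range(max(0, start - 4), start):
--             if (headline_tokens[j] in headline_actions
--                     and headline_tokens[j + 1] == "of"
--                     and all(t in _SERIOUS_CLAIM_BRIDGE_WORDS
--                             for t in headline_tokens[j + 2:start])):
--                 return True
--
--     return False
-- ===== Notes on version B (the rewrite author's own statement) =====
-- stated objective: alternative
-- what changed: Instead of materialising the full list of action positions and testing every (action position, subject span) pair, B scans the headline once and, for each subject span, inspects only the constant-size windows (at most 3 tokens after the span, at most 4 before its start) that the bridge-length bound of 2 allows, so the all-pairs loop disappears.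
import Mathlib
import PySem

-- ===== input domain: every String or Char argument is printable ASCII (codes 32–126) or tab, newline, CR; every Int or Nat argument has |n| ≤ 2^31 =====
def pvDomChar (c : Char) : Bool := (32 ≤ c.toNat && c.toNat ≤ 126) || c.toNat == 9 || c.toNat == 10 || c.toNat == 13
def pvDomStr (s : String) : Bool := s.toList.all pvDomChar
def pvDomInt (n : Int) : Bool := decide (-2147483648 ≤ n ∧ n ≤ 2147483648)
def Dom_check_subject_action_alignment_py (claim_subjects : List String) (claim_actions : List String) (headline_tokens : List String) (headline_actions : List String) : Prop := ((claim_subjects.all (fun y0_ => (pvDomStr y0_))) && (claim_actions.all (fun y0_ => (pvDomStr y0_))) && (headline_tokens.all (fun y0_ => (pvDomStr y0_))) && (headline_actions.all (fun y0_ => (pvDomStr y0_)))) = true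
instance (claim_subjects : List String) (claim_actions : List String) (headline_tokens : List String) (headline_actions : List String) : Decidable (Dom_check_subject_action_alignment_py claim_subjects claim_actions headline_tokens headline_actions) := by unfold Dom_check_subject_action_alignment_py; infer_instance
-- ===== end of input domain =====

-- B replaces A's all-pairs scan over (action position, subject span) by constant-size
-- windows around each span; same return value, proved equivalent below.

-- ===== PORT A =====
def pvBridgeWords : List String :=
  ["is", "was", "were", "has", "have", "had", "been", "being", "be",
   "found", "confirmed", "reportedly", "reported", "declared",
   "officially", "now", "feared"]

-- inner search loop of _find_subject_spans: 'for pos in range(last_pos+1, min(n, last_pos+3)): if ht[pos]==token: break'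
def pvFindPosA (ht : List String) (tok : String) (last : Int) : Option Int :=
  (PySem.List.pyRange (last + 1) (min (ht.length : Int) (last + 3)) 1).find?
    (fun pos => PySem.List.pyGetD ht pos "" == tok)

-- 'for token in unique_subjects[1:]: ...' loop of _find_subject_spans
def pvExtendA (ht : List String) (rest : List String) (matched last : Int) : Int × Int :=
  match rest with
  | [] => (matched, last)
  | tok :: rest' =>
    match pvFindPosA ht tok last with
    | none => (matched, last)
    | some p => pvExtendA ht rest' (matched + 1) p

-- _find_subject_spans
def pvFindSpansA (claim_subjects headline_tokens : List String) : List (Int × Int) :=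
  if claim_subjects = [] || headline_tokens = [] then []
  else
    let uniq := PySem.List.dedup claim_subjects
    let required : Int := if uniq.length = 1 then 1 else 2
    (PySem.List.pyRange 0 (headline_tokens.length : Int) 1).foldl
      (fun spans start =>
        if PySem.List.pyGetD headline_tokens start "" ≠ PySem.List.pyGetD uniq 0 "" then spans
        else
          let me := pvExtendA headline_tokens (PySem.List.slice uniq (some 1) none) 1 start
          if me.1 ≥ required then spans ++ [(start, me.2)] else spans) []

-- body of the 'for span_start, span_end in subject_spans' loop (two early-return tests)
def pvPairCondA (ht : List String) (act : Int) (se : Int × Int) : Bool :=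
  (decide (se.2 < act) &&
    (let bridge := PySem.List.slice ht (some (se.2 + 1)) (some act)
     decide (bridge.length ≤ 2) && bridge.all (fun t => pvBridgeWords.contains t)))
  ||
  (decide (act < se.1) &&
    !((decide (act + 1 ≥ (ht.length : Int))) || (PySem.List.pyGetD ht (act + 1) "" != "of")) &&
    (let bridge := PySem.List.slice ht (some (act + 2)) (some se.1)
     decide (bridge.length ≤ 2) && bridge.all (fun t => pvBridgeWords.contains t)))

def check_subject_action_alignment_py (claim_subjects : List String) (claim_actions : List String) (headline_tokens : List String) (headline_actions : List String) : Bool :=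
  if claim_subjects = [] || headline_tokens = [] then false
  else
    let subject_spans := pvFindSpansA claim_subjects headline_tokens
    let action_positions := (PySem.List.enumerate headline_tokens 0).filterMap
      (fun p => if PySem.Set.contains headline_actions p.2 then some p.1 else none)
    if action_positions = [] || subject_spans = [] then false
    else
      action_positions.any (fun act =>
        subject_spans.any (fun se => pvPairCondA headline_tokens act se))

-- ===== PORT B =====
-- 'for sub in subjects[1:]' span-extension loop of B
def pvExtendB (ht : List String) (subs : List String) (matched endp : Int) : Int × Int :=
  match subs with
  | [] => (matched, endp)
  | sub :: rest =>
    if endp + 1 < (ht.length : Int) && (PySem.List.pyGetD ht (endp + 1) "" == sub) then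
      pvExtendB ht rest (matched + 1) (endp + 1)
    else if endp + 2 < (ht.length : Int) && (PySem.List.pyGetD ht (endp + 2) "" == sub) then
      pvExtendB ht rest (matched + 1) (endp + 2)
    else (matched, endp)

-- B's 'while j < n and j <= end + 3' forward-window loop
def pvFwdB (ht ha : List String) (endp j : Int) : Bool :=
  if h : j < (ht.length : Int) ∧ j ≤ endp + 3 then
    if PySem.Set.contains ha (PySem.List.pyGetD ht j "") then true
    else if !(pvBridgeWords.contains (PySem.List.pyGetD ht j "")) then false
    else pvFwdB ht ha endp (j + 1)
  else false
termination_by (endp + 4 - j).toNat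
decreasing_by omega

-- B's 'for j in range(max(0, start-4), start)' backward-window loop
def pvBwdB (ht ha : List String) (start : Int) : Bool :=
  (PySem.List.pyRange (max 0 (start - 4)) start 1).any (fun j =>
    PySem.Set.contains ha (PySem.List.pyGetD ht j "") &&
    (PySem.List.pyGetD ht (j + 1) "" == "of") &&
    (PySem.List.slice ht (some (j + 2)) (some start)).all (fun t => pvBridgeWords.contains t))

def check_subject_action_alignment_py_alt (claim_subjects : List String) (claim_actions : List String) (headline_tokens : List String) (headline_actions : List String) : Bool :=
  if claim_subjects = [] || headline_tokens = [] then false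
  else
    let subjects := PySem.List.dedup claim_subjects
    let need : Int := if subjects.length = 1 then 1 else 2
    (PySem.List.enumerate headline_tokens 0).any (fun p =>
      if p.2 ≠ PySem.List.pyGetD subjects 0 "" then false
      else
        let me := pvExtendB headline_tokens (PySem.List.slice subjects (some 1) none) 1 p.1
        if me.1 < need then false
        else
          pvFwdB headline_tokens headline_actions me.2 (me.2 + 1) ||
          pvBwdB headline_tokens headline_actions p.1)

-- ===== PRECONDITION & SPEC =====
def Spec_check_subject_action_alignment_py (claim_subjects : List String) (claim_actions : List String) (headline_tokens : List String) (headline_actions : List String) (out : Bool) : Prop := out = check_subject_action_alignment_py_alt claim_subjects claim_actions headline_tokens headline_actions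
instance (claim_subjects : List String) (claim_actions : List String) (headline_tokens : List String) (headline_actions : List String) (out : Bool) : Decidable (Spec_check_subject_action_alignment_py claim_subjects claim_actions headline_tokens headline_actions out) := by unfold Spec_check_subject_action_alignment_py; infer_instance

-- ===== CLAIM (what is proved, stated in full; the proofs are below) =====
def Claim_equal_check_subject_action_alignment_py : Prop := ∀ (claim_subjects : List String) (claim_actions : List String) (headline_tokens : List String) (headline_actions : List String), Dom_check_subject_action_alignment_py claim_subjects claim_actions headline_tokens headline_actions → Spec_check_subject_action_alignment_py claim_subjects claim_actions headline_tokens headline_actions (check_subject_action_alignment_py claim_subjects claim_actions headline_tokens headline_actions)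

-- ===== LEMMAS AND PROOFS =====

theorem pv_bool_ext {a b : Bool} (h : a = true ↔ b = true) : a = b := by
  cases a <;> cases b <;> simp_all

theorem pv_any_or {α : Type} (l : List α) (p q : α → Bool) :
    (l.any fun x => p x || q x) = (l.any p || l.any q) := by
  apply pv_bool_ext
  simp only [List.any_eq_true, Bool.or_eq_true]
  constructor
  · rintro ⟨x, hx, h | h⟩
    · exact Or.inl ⟨x, hx, h⟩
    · exact Or.inr ⟨x, hx, h⟩
  · rintro (⟨x, hx, h⟩ | ⟨x, hx, h⟩)
    · exact ⟨x, hx, Or.inl h⟩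
    · exact ⟨x, hx, Or.inr h⟩

theorem pv_any_any_comm {α β : Type} (l : List α) (m : List β) (f : α → β → Bool) :
    (l.any fun a => m.any fun b => f a b) = (m.any fun b => l.any fun a => f a b) := by
  apply pv_bool_ext
  simp only [List.any_eq_true]
  constructor
  · rintro ⟨a, ha, b, hb, h⟩; exact ⟨b, hb, a, ha, h⟩
  · rintro ⟨b, hb, a, ha, h⟩; exact ⟨a, ha, b, hb, h⟩

theorem pv_clampIdx_eq (n : Nat) (x : Int) (h0 : 0 ≤ x) :
    PySem.List.clampIdx n x = min x.toNat n := by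
  have hx : x = ((x.toNat : Nat) : Int) := by omega
  rw [hx, PySem.List.clampIdx_natCast]
  omega

theorem pv_extend_eq (ht : List String) (rest : List String) :
    ∀ (m l : Int), pvExtendA ht rest m l = pvExtendB ht rest m l := by
  induction rest with
  | nil => intro m l; rfl
  | cons tok rest ih =>
    intro m l
    simp only [pvExtendA, pvExtendB, pvFindPosA]
    by_cases h1 : l + 1 < min (ht.length : Int) (l + 3)
    · rw [PySem.List.pyRange_one_cons h1]
      by_cases hb1 : (PySem.List.pyGetD ht (l + 1) "" == tok) = true
      · simp [List.find?, hb1, show l + 1 < (ht.length : Int) by omega, ih]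
      · by_cases h2 : l + 2 < min (ht.length : Int) (l + 3)
        · rw [PySem.List.pyRange_one_cons (by omega : l + 1 + 1 < min (ht.length : Int) (l + 3))]
          rw [PySem.List.pyRange_one_eq_nil (by omega : min (ht.length : Int) (l + 3) ≤ l + 1 + 1 + 1)]
          rw [show (l + 1 + 1 : Int) = l + 2 by ring]
          by_cases hb2 : (PySem.List.pyGetD ht (l + 2) "" == tok) = true
          · simp [List.find?, hb1, hb2, show l + 1 < (ht.length : Int) by omega,
              show l + 2 < (ht.length : Int) by omega, ih]
          · simp [List.find?, hb1, hb2, show l + 1 < (ht.length : Int) by omega]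
        · rw [PySem.List.pyRange_one_eq_nil (by omega : min (ht.length : Int) (l + 3) ≤ l + 1 + 1)]
          have hn2 : ¬ (l + 2 < (ht.length : Int)) := by omega
          simp [List.find?, hb1, hn2, show l + 1 < (ht.length : Int) by omega]
    · rw [PySem.List.pyRange_one_eq_nil (by omega)]
      have hn1 : ¬ (l + 1 < (ht.length : Int)) := by omega
      have hn2 : ¬ (l + 2 < (ht.length : Int)) := by omega
      simp [List.find?, hn1, hn2]

theorem pv_extendB_bounds (ht : List String) (subs : List String) :
    ∀ (m endp : Int), 0 ≤ endp → endp < (ht.length : Int) →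
      endp ≤ (pvExtendB ht subs m endp).2 ∧ (pvExtendB ht subs m endp).2 < (ht.length : Int) := by
  induction subs with
  | nil => intro m endp h0 h1; exact ⟨le_refl _, h1⟩
  | cons sub rest ih =>
    intro m endp h0 h1
    simp only [pvExtendB]
    by_cases hc1 : (decide (endp + 1 < (ht.length : Int)) && (PySem.List.pyGetD ht (endp + 1) "" == sub)) = true
    · rw [if_pos hc1]
      have hlt : endp + 1 < (ht.length : Int) := by
        have := hc1
        simp only [Bool.and_eq_true, decide_eq_true_eq] at this
        exact this.1
      have := ih (m + 1) (endp + 1) (by omega) hlt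
      exact ⟨by omega, this.2⟩
    · rw [if_neg hc1]
      by_cases hc2 : (decide (endp + 2 < (ht.length : Int)) && (PySem.List.pyGetD ht (endp + 2) "" == sub)) = true
      · rw [if_pos hc2]
        have hlt : endp + 2 < (ht.length : Int) := by
          have := hc2
          simp only [Bool.and_eq_true, decide_eq_true_eq] at this
          exact this.1
        have := ih (m + 1) (endp + 2) (by omega) hlt
        exact ⟨by omega, this.2⟩
      · rw [if_neg hc2]; exact ⟨le_refl _, h1⟩

theorem pv_slice_all_iff (ht : List String) (p : String → Bool) (a b : Int)
    (ha0 : 0 ≤ a) (hb0 : 0 ≤ b) (hbn : b ≤ (ht.length : Int)) :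
    ((PySem.List.slice ht (some a) (some b)).all p = true) ↔
      (∀ m : Int, a ≤ m → m < b → p (PySem.List.pyGetD ht m "") = true) := by
  rw [PySem.List.slice_toNat ht ha0 hb0]
  simp only [List.all_eq_true]
  constructor
  · intro h m hm1 hm2
    have hmn : m.toNat < ht.length := by omega
    rw [PySem.List.pyGetD_eq_getElem ht "" (by omega) (by omega)]
    apply h
    rw [List.mem_iff_getElem?]
    refine ⟨m.toNat - a.toNat, ?_⟩
    rw [List.getElem?_take, if_pos (by omega), List.getElem?_drop,
      show a.toNat + (m.toNat - a.toNat) = m.toNat by omega,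
      List.getElem?_eq_getElem hmn]
  · intro h x hx
    rw [List.mem_iff_getElem?] at hx
    obtain ⟨i, hi⟩ := hx
    rw [List.getElem?_take] at hi
    by_cases hib : i < b.toNat - a.toNat
    · rw [if_pos hib, List.getElem?_drop] at hi
      have hlen : a.toNat + i < ht.length := by
        by_contra hc
        push_neg at hc
        rw [List.getElem?_eq_none (by omega)] at hi
        simp at hi
      rw [List.getElem?_eq_getElem hlen] at hi
      have hxeq : x = ht[a.toNat + i] := (Option.some.inj hi).symm
      have hres := h (((a.toNat + i : Nat) : Int)) (by omega) (by omega)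
      rw [PySem.List.pyGetD_eq_getElem ht "" (by omega) (by omega)] at hres
      simp only [Int.toNat_natCast] at hres
      rw [hxeq]
      exact hres
    · rw [if_neg hib] at hi
      simp at hi

theorem pv_fwd_iff (ht ha : List String) (endp : Int) (j : Int) :
    pvFwdB ht ha endp j = true ↔
      ∃ i : Int, j ≤ i ∧ i < (ht.length : Int) ∧ i ≤ endp + 3 ∧
        PySem.Set.contains ha (PySem.List.pyGetD ht i "") = true ∧
        ∀ m : Int, j ≤ m → m < i → pvBridgeWords.contains (PySem.List.pyGetD ht m "") = true := by
  have H : ∀ (k : Nat) (j : Int), (endp + 4 - j).toNat ≤ k →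
      (pvFwdB ht ha endp j = true ↔
        ∃ i : Int, j ≤ i ∧ i < (ht.length : Int) ∧ i ≤ endp + 3 ∧
          PySem.Set.contains ha (PySem.List.pyGetD ht i "") = true ∧
          ∀ m : Int, j ≤ m → m < i → pvBridgeWords.contains (PySem.List.pyGetD ht m "") = true) := by
    intro k
    induction k with
    | zero =>
      intro j hk
      have hj : ¬ (j < (ht.length : Int) ∧ j ≤ endp + 3) := by omega
      rw [pvFwdB, dif_neg hj]
      constructor
      · intro h; simp at h
      · rintro ⟨i, h1, h2, h3, _, _⟩; omega
    | succ k ih =>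
      intro j hk
      rw [pvFwdB]
      by_cases hj : j < (ht.length : Int) ∧ j ≤ endp + 3
      · rw [dif_pos hj]
        by_cases hc : PySem.Set.contains ha (PySem.List.pyGetD ht j "") = true
        · rw [if_pos hc]
          constructor
          · intro _
            exact ⟨j, le_refl _, hj.1, hj.2, hc, fun m hm1 hm2 => absurd hm2 (by omega)⟩
          · intro _; rfl
        · by_cases hbr : pvBridgeWords.contains (PySem.List.pyGetD ht j "") = true
          · rw [if_neg hc, if_neg (show
              ¬ ((!pvBridgeWords.contains (PySem.List.pyGetD ht j "")) = true) by
                rw [hbr]; decide)]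
            rw [ih (j + 1) (by omega)]
            constructor
            · rintro ⟨i, h1, h2, h3, h4, h5⟩
              refine ⟨i, by omega, h2, h3, h4, fun m hm1 hm2 => ?_⟩
              rcases eq_or_lt_of_le hm1 with heq | hlt
              · rw [← heq]; exact hbr
              · exact h5 m (by omega) hm2
            · rintro ⟨i, h1, h2, h3, h4, h5⟩
              have hij : j ≠ i := fun he => hc (he ▸ h4)
              exact ⟨i, by omega, h2, h3, h4, fun m hm1 hm2 => h5 m (by omega) hm2⟩
          · rw [if_neg hc, if_pos (show (!pvBridgeWords.contains (PySem.List.pyGetD ht j "")) = true by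
              cases hx : pvBridgeWords.contains (PySem.List.pyGetD ht j "") <;> simp_all)]
            constructor
            · intro h; simp at h
            · rintro ⟨i, h1, h2, h3, h4, h5⟩
              rcases eq_or_lt_of_le h1 with heq | hlt
              · exact absurd h4 (heq ▸ hc)
              · exact absurd (h5 j (le_refl _) hlt) hbr
      · rw [dif_neg hj]
        constructor
        · intro h; simp at h
        · rintro ⟨i, h1, h2, h3, _, _⟩; omega
  exact H ((endp + 4 - j).toNat) j (le_refl _)

theorem pv_mem_AP (ht ha : List String) (act : Int) :
    act ∈ (PySem.List.enumerate ht 0).filterMap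
        (fun p => if PySem.Set.contains ha p.2 then some p.1 else none) ↔
      0 ≤ act ∧ act < (ht.length : Int) ∧
        PySem.Set.contains ha (PySem.List.pyGetD ht act "") = true := by
  simp only [List.mem_filterMap]
  constructor
  · rintro ⟨p, hp, hif⟩
    rw [PySem.List.mem_enumerate_iff] at hp
    obtain ⟨k, hk, rfl⟩ := hp
    by_cases hc : PySem.Set.contains ha ht[k] = true
    · rw [if_pos hc] at hif
      have h' := Option.some.inj hif
      have hact : act = (k : Int) := by omega
      subst hact
      refine ⟨by omega, by exact_mod_cast hk, ?_⟩
      rw [PySem.List.pyGetD_eq_getElem ht "" (by omega) (by exact_mod_cast hk)]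
      simpa using hc
    · rw [if_neg hc] at hif
      simp at hif
  · rintro ⟨h0, h1, hc⟩
    refine ⟨(act, PySem.List.pyGetD ht act ""), ?_, by rw [if_pos hc]⟩
    rw [PySem.List.mem_enumerate_iff]
    refine ⟨act.toNat, by omega, ?_⟩
    rw [PySem.List.pyGetD_eq_getElem ht "" h0 h1]
    rw [show ((0 : Int) + (act.toNat : Int)) = act by omega]

theorem pv_F (ht ha : List String) (e : Int) (he : 0 ≤ e) (hen : e < (ht.length : Int)) :
    (((PySem.List.enumerate ht 0).filterMap
        (fun p => if PySem.Set.contains ha p.2 then some p.1 else none)).any fun act =>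
      decide (e < act) &&
        (decide ((PySem.List.slice ht (some (e + 1)) (some act)).length ≤ 2) &&
          (PySem.List.slice ht (some (e + 1)) (some act)).all (fun t => pvBridgeWords.contains t)))
      = pvFwdB ht ha e (e + 1) := by
  apply pv_bool_ext
  rw [pv_fwd_iff]
  simp only [List.any_eq_true, Bool.and_eq_true, decide_eq_true_eq]
  constructor
  · rintro ⟨act, hmem, hlt, hlen, hall⟩
    rw [pv_mem_AP] at hmem
    obtain ⟨h0, h1, hc⟩ := hmem
    have hlen' : act ≤ e + 3 := by
      rw [PySem.List.length_slice, pv_clampIdx_eq _ _ (by omega), pv_clampIdx_eq _ _ (by omega)] at hlen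
      omega
    refine ⟨act, by omega, h1, hlen', hc, ?_⟩
    intro m hm1 hm2
    exact (pv_slice_all_iff ht _ (e + 1) act (by omega) (by omega) (by omega)).mp hall m hm1 hm2
  · rintro ⟨i, h1, h2, h3, h4, h5⟩
    refine ⟨i, (pv_mem_AP ht ha i).mpr ⟨by omega, h2, h4⟩, by omega, ?_, ?_⟩
    · rw [PySem.List.length_slice, pv_clampIdx_eq _ _ (by omega), pv_clampIdx_eq _ _ (by omega)]
      omega
    · exact (pv_slice_all_iff ht _ (e + 1) i (by omega) (by omega) (by omega)).mpr h5

theorem pv_G (ht ha : List String) (s : Int) (hs0 : 0 ≤ s) (hsn : s < (ht.length : Int)) :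
    (((PySem.List.enumerate ht 0).filterMap
        (fun p => if PySem.Set.contains ha p.2 then some p.1 else none)).any fun act =>
      decide (act < s) &&
        !((decide (act + 1 ≥ (ht.length : Int))) || (PySem.List.pyGetD ht (act + 1) "" != "of")) &&
        (decide ((PySem.List.slice ht (some (act + 2)) (some s)).length ≤ 2) &&
          (PySem.List.slice ht (some (act + 2)) (some s)).all (fun t => pvBridgeWords.contains t)))
      = pvBwdB ht ha s := by
  apply pv_bool_ext
  simp only [pvBwdB, List.any_eq_true, Bool.and_eq_true, decide_eq_true_eq,
    Bool.not_eq_true', Bool.or_eq_false_iff, decide_eq_false_iff_not, not_le,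
    bne_eq_false_iff_eq, beq_iff_eq, PySem.List.mem_pyRange_one]
  constructor
  · rintro ⟨act, hmem, ⟨⟨hlt, hn1, hof⟩, hlen, hall⟩⟩
    rw [pv_mem_AP] at hmem
    obtain ⟨h0, h1, hc⟩ := hmem
    have hge : s - 4 ≤ act := by
      rw [PySem.List.length_slice, pv_clampIdx_eq _ _ (by omega), pv_clampIdx_eq _ _ (by omega)] at hlen
      omega
    exact ⟨act, ⟨by omega, hlt⟩, ⟨hc, hof⟩, hall⟩
  · rintro ⟨j, ⟨hj1, hj2⟩, ⟨hc, hof⟩, hall⟩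
    refine ⟨j, (pv_mem_AP ht ha j).mpr ⟨by omega, by omega, hc⟩, ⟨⟨hj2, by omega, hof⟩, ?_, hall⟩⟩
    rw [PySem.List.length_slice, pv_clampIdx_eq _ _ (by omega), pv_clampIdx_eq _ _ (by omega)]
    omega

theorem pv_AB (cs ht ha : List String) (hcs : cs ≠ []) (hht : ht ≠ []) :
    (if ((PySem.List.enumerate ht 0).filterMap
          (fun p => if PySem.Set.contains ha p.2 then some p.1 else none)) = [] ||
        pvFindSpansA cs ht = [] then false
     else ((PySem.List.enumerate ht 0).filterMap
          (fun p => if PySem.Set.contains ha p.2 then some p.1 else none)).any fun act =>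
        (pvFindSpansA cs ht).any fun se => pvPairCondA ht act se)
    = ((PySem.List.enumerate ht 0).any fun p =>
        if p.2 ≠ PySem.List.pyGetD (PySem.List.dedup cs) 0 "" then false
        else
          if (pvExtendB ht (PySem.List.slice (PySem.List.dedup cs) (some 1) none) 1 p.1).1 <
              (if (PySem.List.dedup cs).length = 1 then (1 : Int) else 2) then false
          else
            pvFwdB ht ha
              (pvExtendB ht (PySem.List.slice (PySem.List.dedup cs) (some 1) none) 1 p.1).2
              ((pvExtendB ht (PySem.List.slice (PySem.List.dedup cs) (some 1) none) 1 p.1).2 + 1) ||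
            pvBwdB ht ha p.1) := by
  have hstep1 : (if ((PySem.List.enumerate ht 0).filterMap
          (fun p => if PySem.Set.contains ha p.2 then some p.1 else none)) = [] ||
        pvFindSpansA cs ht = [] then false
     else ((PySem.List.enumerate ht 0).filterMap
          (fun p => if PySem.Set.contains ha p.2 then some p.1 else none)).any fun act =>
        (pvFindSpansA cs ht).any fun se => pvPairCondA ht act se)
      = (((PySem.List.enumerate ht 0).filterMap
          (fun p => if PySem.Set.contains ha p.2 then some p.1 else none)).any fun act =>
        (pvFindSpansA cs ht).any fun se => pvPairCondA ht act se) := by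
    by_cases h1 : ((PySem.List.enumerate ht 0).filterMap
        (fun p => if PySem.Set.contains ha p.2 then some p.1 else none)) = []
    · rw [if_pos (by rw [decide_eq_true h1, Bool.true_or]), h1]
      rfl
    · by_cases h2 : pvFindSpansA cs ht = []
      · rw [if_pos (by rw [decide_eq_true h2, Bool.or_true]), h2]
        symm
        rw [List.any_eq_false]
        intro x hx
        simp
      · rw [if_neg (by rw [decide_eq_false h1, decide_eq_false h2]; decide)]
  rw [hstep1, pv_any_any_comm]
  have hspans : pvFindSpansA cs ht = (((PySem.List.pyRange 0 (ht.length : Int) 1).filter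
      (fun start => (PySem.List.pyGetD ht start "" == PySem.List.pyGetD (PySem.List.dedup cs) 0 "") &&
        decide ((pvExtendB ht (PySem.List.slice (PySem.List.dedup cs) (some 1) none) 1 start).1 ≥
          (if (PySem.List.dedup cs).length = 1 then (1 : Int) else 2)))).map
      (fun start => (start,
        (pvExtendB ht (PySem.List.slice (PySem.List.dedup cs) (some 1) none) 1 start).2))) := by
    unfold pvFindSpansA
    rw [if_neg (by simp [hcs, hht])]
    dsimp only
    have hcongr := PySem.List.foldl_congr_mem (PySem.List.pyRange 0 (ht.length : Int) 1)
      (fun (spans : List (Int × Int)) (start : Int) =>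
        if PySem.List.pyGetD ht start "" ≠ PySem.List.pyGetD (PySem.List.dedup cs) 0 "" then spans
        else
          if (pvExtendA ht (PySem.List.slice (PySem.List.dedup cs) (some 1) none) 1 start).1 ≥
              (if (PySem.List.dedup cs).length = 1 then (1 : Int) else 2) then
            spans ++ [(start,
              (pvExtendA ht (PySem.List.slice (PySem.List.dedup cs) (some 1) none) 1 start).2)]
          else spans)
      (fun (acc : List (Int × Int)) (start : Int) =>
        if ((PySem.List.pyGetD ht start "" == PySem.List.pyGetD (PySem.List.dedup cs) 0 "") &&
            decide ((pvExtendB ht (PySem.List.slice (PySem.List.dedup cs) (some 1) none) 1 start).1 ≥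
              (if (PySem.List.dedup cs).length = 1 then (1 : Int) else 2))) = true
        then acc ++ [(start,
          (pvExtendB ht (PySem.List.slice (PySem.List.dedup cs) (some 1) none) 1 start).2)]
        else acc) []
      (by
        intro acc x hx
        simp only [pv_extend_eq]
        by_cases hb1 : PySem.List.pyGetD ht x "" = PySem.List.pyGetD (PySem.List.dedup cs) 0 ""
        · by_cases hb2 : (pvExtendB ht (PySem.List.slice (PySem.List.dedup cs) (some 1) none) 1 x).1 ≥
              (if (PySem.List.dedup cs).length = 1 then (1 : Int) else 2)
          · rw [if_neg (not_not_intro hb1), if_pos hb2, if_pos (show _ = true by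
              simp only [Bool.and_eq_true, beq_iff_eq, decide_eq_true_eq]
              exact ⟨hb1, hb2⟩)]
          · rw [if_neg (not_not_intro hb1), if_neg hb2, if_neg (show ¬ _ = true by
              simp only [Bool.and_eq_true, beq_iff_eq, decide_eq_true_eq]
              exact fun h => hb2 h.2)]
        · rw [if_pos hb1, if_neg (show ¬ _ = true by
            simp only [Bool.and_eq_true, beq_iff_eq, decide_eq_true_eq]
            exact fun h => hb1 h.1)])
    rw [hcongr, PySem.List.foldl_append_if]
    simp
  rw [hspans, List.any_map, List.any_filter]
  conv_rhs => rw [PySem.List.enumerate_eq_map_pyRange ht "", List.any_map, PySem.List.len_eq]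
  apply PySem.List.any_congr_mem
  intro j hj
  rw [PySem.List.mem_pyRange_one] at hj
  obtain ⟨hj0, hjn⟩ := hj
  dsimp only [Function.comp]
  by_cases hg : PySem.List.pyGetD ht j "" = PySem.List.pyGetD (PySem.List.dedup cs) 0 ""
  · by_cases hm : (pvExtendB ht (PySem.List.slice (PySem.List.dedup cs) (some 1) none) 1 j).1 ≥
        (if (PySem.List.dedup cs).length = 1 then (1 : Int) else 2)
    · have hb := pv_extendB_bounds ht (PySem.List.slice (PySem.List.dedup cs) (some 1) none) 1 j hj0 hjn
      rw [if_neg (not_not_intro hg), if_neg (not_lt.mpr hm)]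
      have hP : ((PySem.List.pyGetD ht j "" == PySem.List.pyGetD (PySem.List.dedup cs) 0 "") &&
          decide ((pvExtendB ht (PySem.List.slice (PySem.List.dedup cs) (some 1) none) 1 j).1 ≥
            (if (PySem.List.dedup cs).length = 1 then (1 : Int) else 2))) = true := by
        simp only [Bool.and_eq_true, beq_iff_eq, decide_eq_true_eq]
        exact ⟨hg, hm⟩
      rw [hP, Bool.true_and]
      simp only [pvPairCondA]
      rw [pv_any_or, pv_F ht ha _ (by omega) hb.2, pv_G ht ha j hj0 hjn]
    · rw [if_neg (not_not_intro hg), if_pos (lt_of_not_ge hm)]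
      simp only [decide_eq_false hm, Bool.and_false, Bool.false_and]
  · rw [if_pos hg]
    simp only [beq_eq_false_iff_ne.mpr hg, Bool.false_and]

-- ===== VERDICT (by name: the statement is the Claim_ definition above) =====
theorem check_subject_action_alignment_py_spec : Claim_equal_check_subject_action_alignment_py := by
  intro cs ca ht ha _hdom
  unfold Spec_check_subject_action_alignment_py
  unfold check_subject_action_alignment_py check_subject_action_alignment_py_alt
  by_cases hcs : cs = []
  · simp [hcs]
  by_cases hht : ht = []
  · simp [hht]
  have h0 : ¬ ((decide (cs = []) || decide (ht = [])) = true) := by simp [hcs, hht]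
  rw [if_neg h0, if_neg h0]
  exact pv_AB cs ht ha hcs hht
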